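-- pv_equiv track=rewrite | github.com/Sanskarsingh0077/DATA-STRUCTURES | Interview Experiences/SDE1Onsite.py | solve
-- ===== SOURCE A (Python) =====
-- def solve(strg, k ):
--     n = len(strg)
--     freq = {}
--
--     i = 0
--     j = k - 1
--
--     while j<n:
--         sub = s[i:j+1]
--         freq[sub] = freq.get(sub,0) + 1
--
--         i +=1
--         j += 1
--
--     return max(freq.values())
--
--
--     '''
--     for i in range(n-k+1):
--         temp = s[i:i+k]
--         if temp not in freq:
--             freq[temp] = 1
--         else:
--             freq[temp] += 1
--
--     return max(freq.values())
--
--     '''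
--
-- s = ' aabbaaccaabaa '
-- ===== SOURCE B (Python) =====
-- # B: collect the window substrings, sort them, and scan the sorted list
-- # counting maximal runs of equal substrings -- no frequency dict at all.
-- s = ' aabbaaccaabaa '
--
-- def solve(strg, k):
--     n = len(strg)
--     subs = sorted(s[i:i + k] for i in range(n - k + 1))
--     best = 0
--     run = 0
--     prev = None
--     for sub in subs:
--         if sub == prev:
--             run += 1
--         else:
--             run = 1
--             prev = sub
--         if run > best:
--             best = run
--     return best
-- ===== Notes on version B (the rewrite author's own statement) =====
-- stated objective: alternative
-- what changed: B drops the sliding-window frequency dict entirely: it collects the window substrings of the global s into a list, sorts it, and scans the sorted list counting maximal runs of equal substrings, returning the longest run.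
import Mathlib
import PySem

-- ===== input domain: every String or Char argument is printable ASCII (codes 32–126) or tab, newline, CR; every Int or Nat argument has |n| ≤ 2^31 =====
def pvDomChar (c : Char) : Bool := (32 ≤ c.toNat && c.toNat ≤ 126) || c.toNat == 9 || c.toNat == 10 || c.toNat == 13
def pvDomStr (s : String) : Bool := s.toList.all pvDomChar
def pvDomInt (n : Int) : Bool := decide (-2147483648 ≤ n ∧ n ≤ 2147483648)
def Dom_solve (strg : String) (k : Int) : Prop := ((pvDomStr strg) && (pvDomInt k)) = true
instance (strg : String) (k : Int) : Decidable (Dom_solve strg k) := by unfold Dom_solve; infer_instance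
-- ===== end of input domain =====

-- Both programs read windows of the GLOBAL string s, not of strg (a quirk of A kept by B).
def pvGlobalS : String := " aabbaaccaabaa "

-- ===== PORT A =====
-- the while loop: while j < n: sub = s[i:j+1]; freq[sub] = freq.get(sub,0)+1; i += 1; j += 1
def solveLoopA (n i j : Int) (freq : PySem.Dict String Int) : PySem.Dict String Int :=
  if _h : j < n then
    let sub := PySem.Str.slice pvGlobalS (some i) (some (j + 1))
    solveLoopA n (i + 1) (j + 1) (freq.insert sub (freq.getD sub 0 + 1))
  else freq
termination_by (n - j).toNat
decreasing_by omega

def solve (strg : String) (k : Int) : Int :=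
  let n : Int := PySem.Str.len strg
  let freq := solveLoopA n 0 (k - 1) PySem.Dict.empty
  match PySem.List.max? freq.values (fun v => v) with
  | some v => v
  | none => 0          -- unreachable under Pre_solve (Python: max() raises ValueError)

-- ===== PORT B =====
-- 'sub == prev' of B's loop (prev is None or the previous substring)
def pvMatch (prev : Option String) (sub : String) : Bool :=
  match prev with | some p => sub == p | none => false

-- one fold step of B's run-scan loop; state = (best, run, prev)
def runStep (st : Int × Int × Option String) (sub : String) : Int × Int × Option String :=
  let best := st.1
  let run := st.2.1
  let prev := st.2.2
  let run' := if pvMatch prev sub then run + 1 else 1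
  let prev' := if pvMatch prev sub then prev else some sub
  (if run' > best then run' else best, run', prev')

def solve_alt (strg : String) (k : Int) : Int :=
  let n : Int := PySem.Str.len strg
  -- Python's built-in sorted(...) ported as Lean's stable mergeSort (same ordering, same output)
  let subs := ((PySem.List.pyRange 0 (n - k + 1) 1).map
      (fun i => PySem.Str.slice pvGlobalS (some i) (some (i + k)))).mergeSort
      (fun a b => decide (a ≤ b))
  (subs.foldl runStep (0, 0, none)).1
-- ===== PRECONDITION & SPEC =====
-- Pre_ excludes exactly the inputs where A's max() raises ValueError (no window, empty dict): k > len(strg).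
def Pre_solve (strg : String) (k : Int) : Prop := k ≤ (strg.length : Int)
instance (strg : String) (k : Int) : Decidable (Pre_solve strg k) := by unfold Pre_solve; infer_instance
def pvWitness_solve : String × Int := ("abcab", 2)

def Spec_solve (strg : String) (k : Int) (out : Int) : Prop := out = solve_alt strg k
instance (strg : String) (k : Int) (out : Int) : Decidable (Spec_solve strg k out) := by unfold Spec_solve; infer_instance

-- ===== CLAIM (what is proved, stated in full; the proofs are below) =====
def Claim_equal_solve : Prop := ∀ (strg : String) (k : Int), Dom_solve strg k → Pre_solve strg k → Spec_solve strg k (solve strg k)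
-- ===== LEMMAS AND PROOFS =====

-- reference recursion for B's run scan
def runsRef : Option String → Int → List String → Int
  | _, r, [] => r
  | p, r, x :: xs =>
      if pvMatch p x then runsRef (some x) (r + 1) xs
      else max r (runsRef (some x) 1 xs)

theorem runsRef_ge (l : List String) : ∀ p r, r ≤ runsRef p r l := by
  induction l with
  | nil => intro p r; simp [runsRef]
  | cons x xs ih =>
      intro p r
      simp only [runsRef]
      split
      · have := ih (some x) (r + 1); omega
      · exact le_max_left _ _

theorem foldl_runStep (l : List String) :
    ∀ b r p, r ≤ b → (l.foldl runStep (b, r, p)).1 = max b (runsRef p r l) := by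
  induction l with
  | nil =>
      intro b r p h
      simp only [List.foldl_nil, runsRef, max_def]
      split_ifs <;> omega
  | cons x xs ih =>
      intro b r p h
      simp only [List.foldl_cons, runStep, runsRef]
      by_cases hm : pvMatch p x = true
      · have hp : p = some x := by
          cases p with
          | none => simp [pvMatch] at hm
          | some q => simp only [pvMatch] at hm; rw [eq_of_beq hm]
        simp only [hm, eq_self_iff_true, if_true]
        rw [hp]
        rw [ih _ _ _ (by split_ifs <;> omega)]
        have h1 := runsRef_ge xs (some x) (r + 1)
        simp only [max_def]
        split_ifs <;> omega
      · simp only [hm, if_false, Bool.false_eq_true]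
        rw [ih _ _ _ (by split_ifs <;> omega)]
        have h1 := runsRef_ge xs (some x) 1
        simp only [max_def]
        split_ifs <;> omega

-- continuing a run of y: the pending count r plus remaining occurrences of y is reached
theorem runsRef_cont (l : List String) :
    l.Pairwise (· ≤ ·) → ∀ (y : String) (r : Int), (∀ w ∈ l, y ≤ w) →
      r + (l.count y : Int) ≤ runsRef (some y) r l := by
  induction l with
  | nil => intro _ y r _; simp [runsRef]
  | cons z zs ih =>
      intro hp y r hle
      have hp' := (List.pairwise_cons.mp hp).2
      have hzle := (List.pairwise_cons.mp hp).1
      simp only [runsRef, pvMatch]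
      by_cases hzy : z = y
      · subst hzy
        simp only [beq_self_eq_true, if_true]
        have := ih hp' z (r + 1) hzle
        rw [List.count_cons_self]
        push_cast
        omega
      · rw [if_neg (by simp [hzy])]
        have hylt : y < z := lt_of_le_of_ne (hle z (by simp)) (Ne.symm hzy)
        have hynot : y ∉ zs := fun hy => absurd (hzle y hy) (not_le.mpr hylt)
        have hc : (z :: zs).count y = 0 := by
          simp [List.count_cons, List.count_eq_zero_of_not_mem hynot, hzy]
        rw [hc]
        simp [le_max_left]

-- every element's multiplicity is bounded by the run scan
theorem runsRef_count_le (l : List String) :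
    l.Pairwise (· ≤ ·) → ∀ p r (x : String), x ∈ l → some x ≠ p →
      (l.count x : Int) ≤ runsRef p r l := by
  induction l with
  | nil => intro _ p r x hx; simp at hx
  | cons y ys ih =>
      intro hp p r x hx hne
      have hp' := (List.pairwise_cons.mp hp).2
      have hyle := (List.pairwise_cons.mp hp).1
      simp only [runsRef]
      by_cases hm : pvMatch p y = true
      · have hpy : p = some y := by
          cases p with
          | none => simp [pvMatch] at hm
          | some q => simp only [pvMatch] at hm; rw [eq_of_beq hm]
        simp only [hm, eq_self_iff_true, if_true]
        have hxy : x ≠ y := by intro h; apply hne; rw [h, hpy]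
        have hxys : x ∈ ys := by
          rcases List.mem_cons.mp hx with h | h
          · exact absurd h hxy
          · exact h
        have hc : (y :: ys).count x = ys.count x := by
          simp [List.count_cons, Ne.symm hxy]
        rw [hc]
        exact ih hp' (some y) (r + 1) x hxys (by simp [hxy])
      · simp only [hm, if_false, Bool.false_eq_true]
        by_cases hxy : x = y
        · subst hxy
          rw [List.count_cons_self]
          have := runsRef_cont ys hp' x 1 hyle
          have h2 : max r (runsRef (some x) 1 ys) = max r (runsRef (some x) 1 ys) := rfl
          push_cast
          push_cast at this
          calc (ys.count x : Int) + 1 ≤ runsRef (some x) 1 ys := by omega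
            _ ≤ max r (runsRef (some x) 1 ys) := le_max_right _ _
        · have hxys : x ∈ ys := by
            rcases List.mem_cons.mp hx with h | h
            · exact absurd h hxy
            · exact h
          have hc : (y :: ys).count x = ys.count x := by
            simp [List.count_cons, Ne.symm hxy]
          rw [hc]
          exact le_trans (ih hp' (some y) 1 x hxys (by simp [hxy])) (le_max_right _ _)

-- the run scan's value is the multiplicity of some element
theorem runsRef_exists (l : List String) :
    l.Pairwise (· ≤ ·) → ∀ (y : String) (r : Int), (∀ w ∈ l, y ≤ w) →
      runsRef (some y) r l = r + (l.count y : Int) ∨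
      ∃ x ∈ l, y < x ∧ runsRef (some y) r l = (l.count x : Int) := by
  induction l with
  | nil => intro _ y r _; left; simp [runsRef]
  | cons z zs ih =>
      intro hp y r hle
      have hp' := (List.pairwise_cons.mp hp).2
      have hzle := (List.pairwise_cons.mp hp).1
      simp only [runsRef, pvMatch]
      by_cases hzy : z = y
      · subst hzy
        simp only [beq_self_eq_true, if_true]
        rcases ih hp' z (r + 1) hzle with h | ⟨x, hx, hlt, h⟩
        · left; rw [h, List.count_cons_self]; push_cast; ring
        · right
          refine ⟨x, by simp [hx], hlt, ?_⟩
          have hxz : x ≠ z := fun hh => absurd hh.symm (ne_of_lt hlt)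
          rw [h]; simp [List.count_cons, Ne.symm hxz]
      · rw [if_neg (by simp [hzy])]
        have hylt : y < z := lt_of_le_of_ne (hle z (by simp)) (Ne.symm hzy)
        have hynot : y ∉ zs := fun hy => absurd (hzle y hy) (not_le.mpr hylt)
        have hcy : ((z :: zs).count y : Int) = 0 := by
          simp [List.count_cons, List.count_eq_zero_of_not_mem hynot, hzy]
        rcases ih hp' z 1 hzle with h | ⟨x, hx, hlt, h⟩
        · have hz : runsRef (some z) 1 zs = ((z :: zs).count z : Int) := by
            rw [h, List.count_cons_self]; push_cast; ring
          by_cases hm : runsRef (some z) 1 zs ≤ r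
          · left; rw [max_eq_left hm, hcy]; ring
          · right; exact ⟨z, by simp, hylt, by rw [max_eq_right (le_of_not_ge hm), hz]⟩
        · have hxz : x ≠ z := fun hh => absurd hh.symm (ne_of_lt hlt)
          have hz : runsRef (some z) 1 zs = ((z :: zs).count x : Int) := by
            rw [h]; simp [List.count_cons, Ne.symm hxz]
          by_cases hm : runsRef (some z) 1 zs ≤ r
          · left; rw [max_eq_left hm, hcy]; ring
          · right
            exact ⟨x, by simp [hx], lt_trans hylt hlt, by rw [max_eq_right (le_of_not_ge hm), hz]⟩

-- B's scan on a nonempty sorted list: it equals the multiplicity of some element,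
-- and bounds the multiplicity of every element
theorem runScan_spec (l : List String) (hs : l.Pairwise (· ≤ ·)) (hne : l ≠ []) :
    (∃ x ∈ l, (l.foldl runStep (0, 0, none)).1 = (l.count x : Int)) ∧
    (∀ x ∈ l, (l.count x : Int) ≤ (l.foldl runStep (0, 0, none)).1) := by
  rw [foldl_runStep l 0 0 none le_rfl]
  cases l with
  | nil => exact absurd rfl hne
  | cons h t =>
      have hp' := (List.pairwise_cons.mp hs).2
      have hhle := (List.pairwise_cons.mp hs).1
      have key : runsRef none 0 (h :: t) = max 0 (runsRef (some h) 1 t) := by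
        simp [runsRef, pvMatch]
      constructor
      · rcases runsRef_exists t hp' h 1 hhle with he | ⟨x, hx, hlt, he⟩
        · refine ⟨h, by simp, ?_⟩
          rw [key, he, List.count_cons_self]
          have h0 : (0:Int) ≤ (t.count h : Int) := Int.natCast_nonneg _
          simp only [max_def]
          push_cast
          split_ifs <;> omega
        · refine ⟨x, by simp [hx], ?_⟩
          have hxh : x ≠ h := fun hh => absurd hh.symm (ne_of_lt hlt)
          have hc : (h :: t).count x = t.count x := by simp [List.count_cons, Ne.symm hxh]
          rw [key, he, hc]
          have h1 : 1 ≤ t.count x := List.count_pos_iff.mpr hx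
          simp only [max_def]
          split_ifs <;> omega
      · intro x hx
        exact le_trans (runsRef_count_le (h :: t) hs none 0 x hx (by simp)) (le_max_right _ _)

-- A's while loop is the counting fold over the listed windows
theorem solveLoopA_eq (m : Nat) : ∀ (n i j : Int) (d : PySem.Dict String Int), (n - j).toNat = m →
    solveLoopA n i j d =
      ((PySem.List.pyRange j n 1).map
        (fun jj => PySem.Str.slice pvGlobalS (some (i + (jj - j))) (some (jj + 1)))).foldl
        (fun d x => d.insert x (d.getD x 0 + 1)) d := by
  induction m with
  | zero =>
      intro n i j d hm
      rw [solveLoopA, dif_neg (show ¬ j < n by omega), PySem.List.pyRange_one_eq_nil (by omega)]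
      simp
  | succ m ih =>
      intro n i j d hm
      have hj : j < n := by omega
      rw [solveLoopA, dif_pos hj, PySem.List.pyRange_one_cons hj]
      simp only [List.map_cons, List.foldl_cons]
      rw [ih n (i + 1) (j + 1) _ (by omega)]
      have hinit : PySem.Str.slice pvGlobalS (some (i + (j - j))) (some (j + 1))
          = PySem.Str.slice pvGlobalS (some i) (some (j + 1)) := by
        rw [show i + (j - j) = i from by ring]
      have hmap : (PySem.List.pyRange (j + 1) n).map
            (fun jj => PySem.Str.slice pvGlobalS (some (i + 1 + (jj - (j + 1)))) (some (jj + 1)))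
          = (PySem.List.pyRange (j + 1) n).map
            (fun jj => PySem.Str.slice pvGlobalS (some (i + (jj - j))) (some (jj + 1))) :=
        List.map_congr_left (fun jj _ => by
          rw [show i + 1 + (jj - (j + 1)) = i + (jj - j) from by ring])
      rw [hmap, hinit]

-- the sorted list B scans is a permutation of the window list, so counts/membership transfer
theorem main_eq (L : List String) (hne : L ≠ []) :
    (match PySem.List.max?
        ((L.foldl (fun d x => d.insert x (d.getD x 0 + 1)) PySem.Dict.empty).values)
        (fun v => v) with
      | some v => v
      | none => 0) =
    ((L.mergeSort (fun a b => decide (a ≤ b))).foldl runStep (0, 0, none)).1 := by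
  have hvals : (L.foldl (fun d x => d.insert x (d.getD x 0 + 1)) PySem.Dict.empty).values
      = (PySem.Set.ofList L).map (fun x => (L.count x : Int)) := by
    rw [PySem.Dict.foldl_insert_getD_add_one_eq_counter]
    show (PySem.Dict.counter L).items.map (·.2) = _
    rw [PySem.Dict.items_counter]
    simp
  rw [hvals]
  have hSne : PySem.Set.ofList L ≠ [] := by
    cases L with
    | nil => exact absurd rfl hne
    | cons a t =>
        intro h
        have : a ∈ PySem.Set.ofList (a :: t) := (PySem.Set.mem_ofList _ _).mpr (by simp)
        rw [h] at this
        simp at this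
  obtain ⟨v, hv⟩ : ∃ v, PySem.List.max? ((PySem.Set.ofList L).map (fun x => (L.count x : Int)))
      (fun v => v) = some v := by
    rcases h : PySem.List.max? ((PySem.Set.ofList L).map (fun x => (L.count x : Int)))
        (fun v => v) with _ | v
    · rw [PySem.List.max?_eq_none_iff] at h
      simp only [List.map_eq_nil_iff] at h
      exact absurd h hSne
    · exact ⟨v, rfl⟩
  rw [hv]
  have hred : (match some v with | some v => v | none => (0:Int)) = v := rfl
  rw [hred]
  have hperm : (L.mergeSort (fun a b => decide (a ≤ b))).Perm L := List.mergeSort_perm L _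
  have hs : (L.mergeSort (fun a b => decide (a ≤ b))).Pairwise (· ≤ ·) := by
    have h := List.pairwise_mergeSort (le := fun a b : String => decide (a ≤ b))
      (fun a b c hab hbc => by simp only [decide_eq_true_eq] at *; exact le_trans hab hbc)
      (fun a b => by simpa using le_total a b) L
    exact h.imp (fun hb => by simpa using hb)
  have hne' : L.mergeSort (fun a b => decide (a ≤ b)) ≠ [] := by
    intro h
    exact hne ((h ▸ hperm).symm.eq_nil)
  obtain ⟨⟨x0, hx0mem, hx0⟩, hub⟩ := runScan_spec _ hs hne'
  have hvmem := PySem.List.max?_mem hv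
  have hvmax := PySem.List.max?_isMax hv
  obtain ⟨x, hxS, hxv⟩ := List.mem_map.mp hvmem
  have hxL : x ∈ L := (PySem.Set.mem_ofList _ _).mp hxS
  -- v ≤ scan
  have h1 : v ≤ ((L.mergeSort (fun a b => decide (a ≤ b))).foldl runStep (0, 0, none)).1 := by
    have hx' : x ∈ L.mergeSort (fun a b => decide (a ≤ b)) := hperm.mem_iff.mpr hxL
    have := hub x hx'
    rw [hperm.count_eq] at this
    omega
  -- scan ≤ v
  have h2 : ((L.mergeSort (fun a b => decide (a ≤ b))).foldl runStep (0, 0, none)).1 ≤ v := by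
    have hx0L : x0 ∈ L := hperm.mem_iff.mp hx0mem
    have hmem : (L.count x0 : Int) ∈ (PySem.Set.ofList L).map (fun x => (L.count x : Int)) :=
      List.mem_map.mpr ⟨x0, (PySem.Set.mem_ofList _ _).mpr hx0L, rfl⟩
    have := hvmax _ hmem
    rw [hx0, hperm.count_eq]
    omega
  omega

-- ===== VERDICT (by name: the statement is the Claim_ definition above) =====
theorem solve_spec : Claim_equal_solve := by
  intro strg k _hdom hpre
  unfold Spec_solve
  simp only [solve, solve_alt]
  have hn : PySem.Str.len strg = (strg.length : Int) := by simp
  rw [solveLoopA_eq (PySem.Str.len strg - (k - 1)).toNat (PySem.Str.len strg) 0 (k - 1)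
      PySem.Dict.empty rfl]
  have hre : PySem.List.pyRange (k - 1) (PySem.Str.len strg) 1
      = (PySem.List.pyRange 0 (PySem.Str.len strg - k + 1) 1).map (fun i => i + (k - 1)) := by
    rw [PySem.List.pyRange_one, PySem.List.pyRange_one, List.map_map]
    rw [show PySem.Str.len strg - (k - 1) = PySem.Str.len strg - k + 1 - 0 from by ring]
    apply List.map_congr_left
    intro t _
    simp only [Function.comp]
    omega
  rw [hre, List.map_map]
  have hL : ((PySem.List.pyRange 0 (PySem.Str.len strg - k + 1) 1).map
        ((fun jj => PySem.Str.slice pvGlobalS (some (0 + (jj - (k - 1)))) (some (jj + 1))) ∘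
          (fun i => i + (k - 1))))
      = (PySem.List.pyRange 0 (PySem.Str.len strg - k + 1) 1).map
          (fun i => PySem.Str.slice pvGlobalS (some i) (some (i + k))) := by
    apply List.map_congr_left
    intro i _
    simp only [Function.comp]
    congr 2
    · omega
    · omega
  rw [hL]
  apply main_eq
  have hlen : (0:Int) < PySem.Str.len strg - k + 1 := by
    rw [hn]; unfold Pre_solve at hpre; omega
  intro h
  rw [List.map_eq_nil_iff] at h
  have := PySem.List.length_pyRange_one 0 (PySem.Str.len strg - k + 1)
  rw [h] at this
  simp at this
  omega
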